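-- pv_equiv track=rewrite | github.com/26sensenwang/Nearepos | main.py | find_potentials
-- ===== SOURCE A (Python) =====
-- def find_potentials(array):
--     output = [0,0,0,0,0,0,0,0]
--     for length in range(1,5):
--         if sum(array) == length and -1 not in array:
--             output[(length-1)*2] = 1
--         if sum(array) == -length and 1 not in array:
--             output[(length-1)*2+1] = 1
--     return output
-- ===== SOURCE B (Python) =====
-- def find_potentials(array):
--     s = sum(array)
--     output = [0, 0, 0, 0, 0, 0, 0, 0]
--     if 1 <= s <= 4 and -1 not in array:
--         output[(s - 1) * 2] = 1
--     if -4 <= s <= -1 and 1 not in array: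
--         output[(-s - 1) * 2 + 1] = 1
--     return output
-- ===== Notes on version B (the rewrite author's own statement) =====
-- stated objective: simpler
-- what changed: B drops the 4-iteration loop: it computes the sum once and sets at most two slots directly from the sum's value, since at most one length in 1..4 can equal the fixed sum.
import Mathlib
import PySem

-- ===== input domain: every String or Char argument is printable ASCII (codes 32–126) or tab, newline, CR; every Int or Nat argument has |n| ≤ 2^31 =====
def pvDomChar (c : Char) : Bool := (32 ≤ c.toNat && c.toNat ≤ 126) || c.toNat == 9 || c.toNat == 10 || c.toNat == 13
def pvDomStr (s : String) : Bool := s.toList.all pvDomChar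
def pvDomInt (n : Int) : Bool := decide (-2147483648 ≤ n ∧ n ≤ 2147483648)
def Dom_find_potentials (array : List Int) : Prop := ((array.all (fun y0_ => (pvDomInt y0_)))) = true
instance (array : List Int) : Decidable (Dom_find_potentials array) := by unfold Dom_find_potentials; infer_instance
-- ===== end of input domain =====

-- B replaces A's loop over lengths 1..4 by setting at most two slots directly from the sum (simpler; same return value).

-- ===== PORT A =====
-- loop body: both ifs for one value of `length`; indices are in 0..7 so List.set with .toNat is exact here
def find_potentials_step (array : List Int) (output : List Int) (length : Int) : List Int :=
  let o1 := if array.sum = length ∧ ¬ ((-1 : Int) ∈ array) then output.set ((length - 1) * 2).toNat 1 else output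
  if array.sum = -length ∧ ¬ ((1 : Int) ∈ array) then o1.set (((length - 1) * 2 + 1)).toNat 1 else o1

def find_potentials (array : List Int) : List Int :=
  (PySem.List.pyRange 1 5 1).foldl (find_potentials_step array) [0,0,0,0,0,0,0,0]

-- ===== PORT B =====
def find_potentials_alt (array : List Int) : List Int :=
  let s := array.sum
  let output : List Int := [0,0,0,0,0,0,0,0]
  let output := if 1 ≤ s ∧ s ≤ 4 ∧ ¬ ((-1 : Int) ∈ array) then output.set ((s - 1) * 2).toNat 1 else output
  if -4 ≤ s ∧ s ≤ -1 ∧ ¬ ((1 : Int) ∈ array) then output.set ((-s - 1) * 2 + 1).toNat 1 else output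

-- ===== PRECONDITION & SPEC =====
def Spec_find_potentials (array : List Int) (out : List Int) : Prop := out = find_potentials_alt array
instance (array : List Int) (out : List Int) : Decidable (Spec_find_potentials array out) := by unfold Spec_find_potentials; infer_instance

-- ===== CLAIM (what is proved, stated in full; the proofs are below) =====
def Claim_equal_find_potentials : Prop := ∀ (array : List Int), Dom_find_potentials array → Spec_find_potentials array (find_potentials array)

-- ===== LEMMAS AND PROOFS =====
theorem find_potentials_eq (array : List Int) : find_potentials array = find_potentials_alt array := by
  have hr : PySem.List.pyRange 1 5 1 = [1, 2, 3, 4] := by decide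
  simp only [find_potentials, find_potentials_alt, find_potentials_step, hr, List.foldl]
  by_cases hm1 : (-1 : Int) ∈ array <;> by_cases hp1 : (1 : Int) ∈ array <;>
    simp only [hm1, hp1, not_true_eq_false, not_false_eq_true, and_true, and_false, if_false] <;>
    generalize array.sum = s <;>
    (by_cases hpos : 1 ≤ s ∧ s ≤ 4
     · have h4 : s = 1 ∨ s = 2 ∨ s = 3 ∨ s = 4 := by omega
       rcases h4 with h | h | h | h <;> subst h <;> decide
     · by_cases hneg : -4 ≤ s ∧ s ≤ -1
       · have h4 : s = -1 ∨ s = -2 ∨ s = -3 ∨ s = -4 := by omega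
         rcases h4 with h | h | h | h <;> subst h <;> decide
       · have n1 : ¬(s = (1:Int)) := by omega
         have n2 : ¬(s = (2:Int)) := by omega
         have n3 : ¬(s = (3:Int)) := by omega
         have n4 : ¬(s = (4:Int)) := by omega
         have m1 : ¬(s = (-1:Int)) := by omega
         have m2 : ¬(s = (-2:Int)) := by omega
         have m3 : ¬(s = (-3:Int)) := by omega
         have m4 : ¬(s = (-4:Int)) := by omega
         simp only [if_neg n1, if_neg n2, if_neg n3, if_neg n4,
           if_neg m1, if_neg m2, if_neg m3, if_neg m4, if_neg hpos, if_neg hneg])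

-- ===== VERDICT (by name: the statement is the Claim_ definition above) =====
theorem find_potentials_spec : Claim_equal_find_potentials := by
  intro array _
  exact find_potentials_eq array
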